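-- pv_equiv track=rewrite | github.com/zhuchichi56/Introduction-to-Big-Data | lab and  assignment/数据预处理总结/chimerge_iris.py | build
-- ===== SOURCE A (Python) =====
-- def build(log_cnt):
--     log_dict = {}
--     for record in log_cnt:
--         if record[0] not in log_dict.keys():
--             log_dict[record[0]] = [0, 0, 0]
--         if record[1] == 'Iris-setosa':
--             log_dict[record[0]][0] = record[2]
--         elif record[1] == 'Iris-versicolor':
--             log_dict[record[0]][1] = record[2]
--         elif record[1] == 'Iris-virginica':
--             log_dict[record[0]][2] = record[2]
--         else:
--             raise TypeError('Data Exception')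
--     log_truple = sorted(log_dict.items())
--     return log_truple
-- ===== SOURCE B (Python) =====
-- from itertools import groupby
--
--
-- def build(log_cnt):
--     log_truple = []
--     for key, group in groupby(sorted(log_cnt, key=lambda r: r[0]), key=lambda r: r[0]):
--         slots = [0, 0, 0]
--         for record in group:
--             if record[1] == 'Iris-setosa':
--                 slots[0] = record[2]
--             elif record[1] == 'Iris-versicolor':
--                 slots[1] = record[2]
--             elif record[1] == 'Iris-virginica':
--                 slots[2] = record[2]
--             else:
--                 raise TypeError('Data Exception')
--         log_truple.append((key, slots))
--     return log_truple
-- ===== Notes on version B (the rewrite author's own statement) =====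
-- stated objective: alternative
-- what changed: Replaces the dict-scatter-then-sort strategy (hash map keyed per record, sorted at the end) by a stable sort on the key followed by a single itertools.groupby pass that builds each key's slot list sequentially.
import Mathlib
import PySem

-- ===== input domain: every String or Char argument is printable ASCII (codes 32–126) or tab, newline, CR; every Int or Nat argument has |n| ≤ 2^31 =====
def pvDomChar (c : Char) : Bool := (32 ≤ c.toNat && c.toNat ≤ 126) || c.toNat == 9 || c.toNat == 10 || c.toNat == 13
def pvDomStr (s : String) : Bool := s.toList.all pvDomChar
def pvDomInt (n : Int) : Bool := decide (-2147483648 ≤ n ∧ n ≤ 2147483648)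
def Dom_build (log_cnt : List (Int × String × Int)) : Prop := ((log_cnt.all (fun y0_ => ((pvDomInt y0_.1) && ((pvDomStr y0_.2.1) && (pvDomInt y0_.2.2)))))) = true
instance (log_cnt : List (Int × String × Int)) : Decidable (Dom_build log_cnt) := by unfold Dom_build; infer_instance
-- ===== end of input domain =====

-- B replaces A's dict-scatter-then-sort by a stable sort on the key followed by one
-- sequential grouping pass (objective: alternative decomposition, same results).

-- ===== PORT A =====
-- one loop step of A: conditional fresh-key insert, then the if/elif slot assignment
def buildStepA (d : PySem.Dict Int (List Int)) (r : Int × String × Int) : PySem.Dict Int (List Int) :=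
  let d1 := if d.contains r.1 then d else d.insert r.1 [0, 0, 0]
  if r.2.1 = "Iris-setosa" then d1.modify r.1 [0, 0, 0] (fun s => s.set 0 r.2.2)
  else if r.2.1 = "Iris-versicolor" then d1.modify r.1 [0, 0, 0] (fun s => s.set 1 r.2.2)
  else if r.2.1 = "Iris-virginica" then d1.modify r.1 [0, 0, 0] (fun s => s.set 2 r.2.2)
  else d1  -- Python raises TypeError('Data Exception') here; excluded by Pre_build

def build (log_cnt : List (Int × String × Int)) : List (Int × List Int) :=
  let log_dict := log_cnt.foldl buildStepA PySem.Dict.empty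
  -- sorted(log_dict.items()): dict keys are distinct, so Python's tuple comparison is
  -- decided by the first component — sorting by the key is exact here
  PySem.List.sorted log_dict.items (fun p => p.1) false

-- ===== PORT B =====
-- the if/elif slot assignment of B's inner loop (on any other label Python raises
-- TypeError('Data Exception'); excluded by Pre_build, the chain falls through unchanged)
def setSlot (slots : List Int) (lbl : String) (v : Int) : List Int :=
  if lbl = "Iris-setosa" then slots.set 0 v
  else if lbl = "Iris-versicolor" then slots.set 1 v
  else if lbl = "Iris-virginica" then slots.set 2 v
  else slots

-- the groupby pass: carry the current key and its slots, emit on each key change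
def groupPass (k : Int) (slots : List Int) : List (Int × String × Int) → List (Int × List Int)
  | [] => [(k, slots)]
  | r :: rest =>
    if r.1 = k then groupPass k (setSlot slots r.2.1 r.2.2) rest
    else (k, slots) :: groupPass r.1 (setSlot [0, 0, 0] r.2.1 r.2.2) rest

def build_alt (log_cnt : List (Int × String × Int)) : List (Int × List Int) :=
  match PySem.List.sorted log_cnt (fun r => r.1) false with
  | [] => []
  | r :: rest => groupPass r.1 (setSlot [0, 0, 0] r.2.1 r.2.2) rest

-- ===== PRECONDITION & SPEC =====
-- Pre_ excludes exactly the inputs holding a record with a label other than the three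
-- iris species, on which the Python A raises TypeError('Data Exception').
def Pre_build (log_cnt : List (Int × String × Int)) : Prop :=
  ∀ r ∈ log_cnt, r.2.1 = "Iris-setosa" ∨ r.2.1 = "Iris-versicolor" ∨ r.2.1 = "Iris-virginica"
instance (log_cnt : List (Int × String × Int)) : Decidable (Pre_build log_cnt) := by
  unfold Pre_build; infer_instance

def pvWitness_build : (List (Int × String × Int)) :=
  [(2, "Iris-setosa", 5), (1, "Iris-virginica", 3), (2, "Iris-versicolor", 4)]

def Spec_build (log_cnt : List (Int × String × Int)) (out : List (Int × List Int)) : Prop := out = build_alt log_cnt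
instance (log_cnt : List (Int × String × Int)) (out : List (Int × List Int)) : Decidable (Spec_build log_cnt out) := by unfold Spec_build; infer_instance

-- ===== CLAIM (what is proved, stated in full; the proofs are below) =====
def Claim_equal_build : Prop := ∀ (log_cnt : List (Int × String × Int)), Dom_build log_cnt → Pre_build log_cnt → Spec_build log_cnt (build log_cnt)

-- ===== LEMMAS AND PROOFS =====

-- the common slot-update step, and the per-key aggregate both programs compute
def applyRec (s : List Int) (r : Int × String × Int) : List Int := setSlot s r.2.1 r.2.2

def aggKey (l : List (Int × String × Int)) (k : Int) : List Int :=
  (l.filter (fun r => decide (r.1 = k))).foldl applyRec [0, 0, 0]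

-- ---- A side: the dict fold, characterised key by key ----

lemma d1_getD (d : PySem.Dict Int (List Int)) (r1 k : Int) :
    (if d.contains r1 then d else d.insert r1 [0, 0, 0]).getD k [0, 0, 0] =
      d.getD k [0, 0, 0] := by
  split
  · rfl
  · next h =>
    rw [PySem.Dict.getD_insert]
    split
    · next hk =>
      subst hk
      exact (PySem.Dict.getD_of_not_contains d _ (by simpa using h)).symm
    · rfl

lemma stepA_getD (d : PySem.Dict Int (List Int)) (r : Int × String × Int) (k : Int) :
    (buildStepA d r).getD k [0, 0, 0] =
      if r.1 = k then applyRec (d.getD k [0, 0, 0]) r else d.getD k [0, 0, 0] := by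
  simp only [buildStepA, applyRec, setSlot]
  by_cases h1 : r.2.1 = "Iris-setosa"
  · rw [if_pos h1, PySem.Dict.getD_modify, d1_getD, d1_getD]
    by_cases hk : r.1 = k
    · subst hk; simp [h1]
    · rw [if_neg (fun h => hk h.symm), if_neg hk]
  · rw [if_neg h1]
    by_cases h2 : r.2.1 = "Iris-versicolor"
    · rw [if_pos h2, PySem.Dict.getD_modify, d1_getD, d1_getD]
      by_cases hk : r.1 = k
      · subst hk; simp [h2]
      · rw [if_neg (fun h => hk h.symm), if_neg hk]
    · rw [if_neg h2]
      by_cases h3 : r.2.1 = "Iris-virginica"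
      · rw [if_pos h3, PySem.Dict.getD_modify, d1_getD, d1_getD]
        by_cases hk : r.1 = k
        · subst hk; simp [h3]
        · rw [if_neg (fun h => hk h.symm), if_neg hk]
      · rw [if_neg h3, d1_getD]
        by_cases hk : r.1 = k
        · subst hk; simp [h1, h2, h3]
        · rw [if_neg hk]

lemma foldA_getD (l : List (Int × String × Int)) :
    ∀ (d : PySem.Dict Int (List Int)) (k : Int),
      (l.foldl buildStepA d).getD k [0, 0, 0] =
        (l.filter (fun r => decide (r.1 = k))).foldl applyRec (d.getD k [0, 0, 0]) := by
  induction l with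
  | nil => intro d k; simp
  | cons r t ih =>
    intro d k
    simp only [List.foldl_cons, List.filter_cons]
    rw [ih, stepA_getD]
    by_cases h : r.1 = k
    · simp [h]
    · simp [h]

lemma stepA_keys (d : PySem.Dict Int (List Int)) (r : Int × String × Int) :
    (buildStepA d r).keys = PySem.Set.add d.keys r.1 := by
  by_cases hcon : d.contains r.1 = true
  · have hmem : r.1 ∈ d.keys := (PySem.Dict.contains_iff_mem_keys d r.1).mp hcon
    have hadd : PySem.Set.add d.keys r.1 = d.keys := by
      simp [PySem.Set.add, PySem.Set.contains, hmem]
    simp only [buildStepA, if_pos hcon, hadd]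
    split_ifs <;>
      simp [PySem.Dict.keys_modify, PySem.Dict.keys_insert_of_contains _ _ hcon]
  · have hncon : d.contains r.1 = false := by simpa using hcon
    have hnmem : r.1 ∉ d.keys := fun hm => hcon ((PySem.Dict.contains_iff_mem_keys d r.1).mpr hm)
    have hadd : PySem.Set.add d.keys r.1 = d.keys ++ [r.1] := by
      simp only [PySem.Set.add]
      rw [if_neg (by simp [PySem.Set.contains, hnmem])]
    have hcon1 : (d.insert r.1 [0, 0, 0]).contains r.1 = true := by
      apply (PySem.Dict.contains_iff_mem_keys _ _).mpr
      rw [PySem.Dict.keys_insert_of_not_contains d _ hncon]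
      simp
    simp only [buildStepA, hncon, if_false, Bool.false_eq_true, hadd]
    split_ifs <;>
      simp [PySem.Dict.keys_modify, PySem.Dict.keys_insert_of_contains _ _ hcon1,
        PySem.Dict.keys_insert_of_not_contains d _ hncon]

lemma foldA_keys (l : List (Int × String × Int)) :
    ∀ (d : PySem.Dict Int (List Int)),
      (l.foldl buildStepA d).keys = (l.map (·.1)).foldl PySem.Set.add d.keys := by
  induction l with
  | nil => intro d; simp
  | cons r t ih =>
    intro d
    simp only [List.foldl_cons, List.map_cons]
    rw [ih, stepA_keys]

lemma build_char (l : List (Int × String × Int)) :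
    build l =
      (PySem.List.sorted (PySem.Set.ofList (l.map (·.1))) (fun k => k) false).map
        (fun k => (k, aggKey l k)) := by
  simp only [build]
  have hkeys : (l.foldl buildStepA PySem.Dict.empty).keys = PySem.Set.ofList (l.map (·.1)) := by
    rw [foldA_keys, PySem.Dict.keys_empty]; rfl
  have hnd : (l.foldl buildStepA PySem.Dict.empty).keys.Nodup := by
    rw [hkeys]; exact PySem.Set.nodup_ofList _
  have hitems : (l.foldl buildStepA PySem.Dict.empty).items =
      (PySem.Set.ofList (l.map (·.1))).map (fun k => (k, aggKey l k)) := by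
    rw [PySem.Dict.items_eq_map_keys _ hnd [0, 0, 0], hkeys]
    apply List.map_congr_left
    intro k _
    rw [foldA_getD, PySem.Dict.getD_empty]
    rfl
  apply PySem.List.sorted_eq_of_perm_of_pairwise_lt
  · rw [hitems]
    exact (PySem.List.sorted_perm _ _ _).map _
  · rw [List.pairwise_map]
    simpa using PySem.List.sorted_ofList_pairwise_lt (l.map (·.1))

-- ---- stability: sorting by the key does not reorder the records of one key ----

lemma filter_insertBy (k : Int) (x : Int × String × Int) :
    ∀ (ys : List (Int × String × Int)), ys.Pairwise (fun a b => a.1 ≤ b.1) →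
      (PySem.List.insertBy (fun a b => decide (a.1 < b.1)) x ys).filter
          (fun r => decide (r.1 = k)) =
        if x.1 = k then ys.filter (fun r => decide (r.1 = k)) ++ [x]
        else ys.filter (fun r => decide (r.1 = k)) := by
  intro ys
  induction ys with
  | nil =>
    intro _
    by_cases hx : x.1 = k <;> simp [PySem.List.insertBy, hx]
  | cons y ys ih =>
    intro hp
    rw [List.pairwise_cons] at hp
    obtain ⟨hy, hp'⟩ := hp
    simp only [PySem.List.insertBy]
    by_cases hb : x.1 < y.1
    · rw [if_pos (by simpa using hb)]
      by_cases hx : x.1 = k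
      · have hnil : (y :: ys).filter (fun r => decide (r.1 = k)) = [] := by
          rw [List.filter_eq_nil_iff]
          intro z hz
          have hz1 : y.1 ≤ z.1 := by
            rcases List.mem_cons.mp hz with h | h
            · rw [h]
            · exact hy z h
          simp only [decide_eq_true_eq]
          omega
        rw [hnil]
        simp [hx, hnil]
      · simp [List.filter_cons, hx]
    · rw [if_neg (by simpa using hb)]
      simp only [List.filter_cons]
      rw [ih hp']
      by_cases hx : x.1 = k <;> by_cases hyk : y.1 = k <;> simp [hx, hyk]

lemma filter_sorted (l : List (Int × String × Int)) (k : Int) :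
    (PySem.List.sorted l (fun r => r.1) false).filter (fun r => decide (r.1 = k)) =
      l.filter (fun r => decide (r.1 = k)) := by
  induction l using List.reverseRecOn with
  | nil => rfl
  | append_singleton t x ih =>
    have h1 : PySem.List.sorted (t ++ [x]) (fun r => r.1) false =
        PySem.List.insertBy (fun a b => decide (a.1 < b.1)) x
          (PySem.List.sorted t (fun r => r.1) false) := by
      rw [PySem.List.sorted_eq_foldl_insertBy, PySem.List.sorted_eq_foldl_insertBy,
        List.foldl_append]
      rfl
    rw [h1, filter_insertBy k x _ (PySem.List.sorted_pairwise t (fun r => r.1)),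
      List.filter_append]
    by_cases hx : x.1 = k <;> simp [hx, ih]

-- ---- PySem.Set facts used to peel one group off a dedup ----

lemma foldl_add_filter (x : Int) :
    ∀ (ys s : List Int), x ∈ s →
      List.foldl PySem.Set.add s ys =
        List.foldl PySem.Set.add s (ys.filter (fun y => decide (y ≠ x))) := by
  intro ys
  induction ys with
  | nil => intro s _; rfl
  | cons y ys ih =>
    intro s hx
    by_cases hxy : y = x
    · subst hxy
      have hadd : PySem.Set.add s y = s := by
        simp [PySem.Set.add, PySem.Set.contains, hx]
      simp only [List.foldl_cons, List.filter_cons, decide_eq_true_eq]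
      rw [if_neg (by simp), hadd]
      exact ih s hx
    · simp only [List.foldl_cons, List.filter_cons, decide_eq_true_eq]
      rw [if_pos hxy, List.foldl_cons]
      exact ih (PySem.Set.add s y) ((PySem.Set.mem_add s y x).mpr (Or.inl hx))

lemma foldl_add_cons (x : Int) :
    ∀ (zs s : List Int), x ∉ zs →
      List.foldl PySem.Set.add (x :: s) zs = x :: List.foldl PySem.Set.add s zs := by
  intro zs
  induction zs with
  | nil => intro s _; rfl
  | cons z zs ih =>
    intro s hx
    have hzx : z ≠ x := fun h => hx (by simp [h])
    have hstep : PySem.Set.add (x :: s) z = x :: PySem.Set.add s z := by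
      simp only [PySem.Set.add, PySem.Set.contains, List.contains_cons]
      have hbe : (z == x) = false := by simp [hzx]
      rw [hbe]
      simp only [Bool.false_or]
      split <;> rfl
    rw [List.foldl_cons, hstep, List.foldl_cons]
    exact ih (PySem.Set.add s z) (fun h => hx (List.mem_cons_of_mem _ h))

lemma dedup_cons (x : Int) (xs : List Int) :
    PySem.List.dedup (x :: xs) =
      x :: PySem.List.dedup (xs.filter (fun y => decide (y ≠ x))) := by
  rw [PySem.List.dedup_eq_ofList, PySem.List.dedup_eq_ofList]
  simp only [PySem.Set.ofList, List.foldl_cons]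
  have h0 : PySem.Set.add PySem.Set.empty x = [x] := rfl
  rw [h0, foldl_add_filter x xs [x] (by simp)]
  have hx : x ∉ xs.filter (fun y => decide (y ≠ x)) := by
    intro h
    have := (List.mem_filter.mp h).2
    simp at this
  exact foldl_add_cons x _ [] hx

lemma foldl_add_sublist :
    ∀ (ys s : List Int), ∃ u, List.foldl PySem.Set.add s ys = s ++ u ∧ u.Sublist ys := by
  intro ys
  induction ys with
  | nil => intro s; exact ⟨[], by simp⟩
  | cons y ys ih =>
    intro s
    rw [List.foldl_cons]
    simp only [PySem.Set.add]
    split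
    · obtain ⟨u, hu, hsub⟩ := ih s
      exact ⟨u, hu, hsub.cons y⟩
    · obtain ⟨u, hu, hsub⟩ := ih (s ++ [y])
      exact ⟨y :: u, by simpa using hu, hsub.cons₂ y⟩

lemma dedup_sublist (xs : List Int) : (PySem.List.dedup xs).Sublist xs := by
  rw [PySem.List.dedup_eq_ofList]
  obtain ⟨u, hu, hsub⟩ := foldl_add_sublist xs []
  simpa [PySem.Set.ofList, PySem.Set.empty, hu] using hsub

-- ---- B side: the grouping pass, characterised against dedup of the keys ----

lemma regroup (r : Int × String × Int) (rest : List (Int × String × Int)) :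
    ((r.1, (rest.filter (fun z => decide (z.1 = r.1))).foldl applyRec (applyRec [0, 0, 0] r)) ::
      (PySem.List.dedup ((rest.filter (fun z => decide (z.1 ≠ r.1))).map (·.1))).map
        (fun k' => (k', (rest.filter (fun z => decide (z.1 = k'))).foldl applyRec [0, 0, 0]))) =
      (PySem.List.dedup ((r :: rest).map (·.1))).map
        (fun k' => (k', ((r :: rest).filter (fun z => decide (z.1 = k'))).foldl applyRec [0, 0, 0])) := by
  have hmap : (r :: rest).map (·.1) = r.1 :: rest.map (·.1) := rfl
  rw [hmap, dedup_cons, List.map_cons]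
  have hcomm : (rest.map (·.1)).filter (fun y => decide (y ≠ r.1)) =
      (rest.filter (fun z => decide (z.1 ≠ r.1))).map (·.1) := by
    rw [List.filter_map]
    rfl
  congr 1
  · simp [applyRec]
  · rw [hcomm]
    apply List.map_congr_left
    intro k' hk'
    have hne : k' ≠ r.1 := by
      rcases List.mem_map.mp ((PySem.List.mem_dedup _ _).mp hk') with ⟨z, hz, rfl⟩
      have := (List.mem_filter.mp hz).2
      simpa using this
    simp [Ne.symm hne]

lemma groupPass_eq :
    ∀ (rest : List (Int × String × Int)) (k : Int) (slots : List Int),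
      rest.Pairwise (fun a b => a.1 ≤ b.1) → (∀ r ∈ rest, k ≤ r.1) →
      groupPass k slots rest =
        (k, (rest.filter (fun r => decide (r.1 = k))).foldl applyRec slots) ::
          (PySem.List.dedup ((rest.filter (fun r => decide (r.1 ≠ k))).map (·.1))).map
            (fun k' => (k', (rest.filter (fun r => decide (r.1 = k'))).foldl applyRec [0, 0, 0])) := by
  intro rest
  induction rest with
  | nil => intro k slots _ _; simp [groupPass]
  | cons r rest ih =>
    intro k slots hp hk
    rw [List.pairwise_cons] at hp
    obtain ⟨hr, hp'⟩ := hp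
    have hkr : k ≤ r.1 := hk r (List.mem_cons_self)
    by_cases hek : r.1 = k
    · simp only [groupPass, if_pos hek]
      rw [ih k (setSlot slots r.2.1 r.2.2) hp'
        (fun z hz => hk z (List.mem_cons_of_mem _ hz))]
      have hfil : (r :: rest).filter (fun r' => decide (r'.1 ≠ k)) =
          rest.filter (fun r' => decide (r'.1 ≠ k)) := by
        simp [hek]
      congr 1
      · simp [hek, applyRec]
      · rw [hfil]
        apply List.map_congr_left
        intro k' hk'
        have hne : k' ≠ k := by
          rcases List.mem_map.mp ((PySem.List.mem_dedup _ _).mp hk') with ⟨z, hz, rfl⟩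
          have := (List.mem_filter.mp hz).2
          simpa using this
        have : ¬ (r.1 = k') := by rw [hek]; exact fun h => hne h.symm
        simp [this]
    · have hlt : k < r.1 := lt_of_le_of_ne hkr (Ne.symm hek)
      have hrest : ∀ z ∈ rest, k < z.1 := fun z hz => lt_of_lt_of_le hlt (hr z hz)
      simp only [groupPass, if_neg hek]
      rw [ih r.1 (setSlot [0, 0, 0] r.2.1 r.2.2) hp' hr]
      have hfk : (r :: rest).filter (fun r' => decide (r'.1 = k)) = [] := by
        rw [List.filter_eq_nil_iff]
        intro z hz
        rcases List.mem_cons.mp hz with h | h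
        · subst h; simpa using hek
        · have := hrest z h
          simp only [decide_eq_true_eq]
          omega
      have hfne : (r :: rest).filter (fun r' => decide (r'.1 ≠ k)) = r :: rest := by
        rw [List.filter_eq_self]
        intro z hz
        rcases List.mem_cons.mp hz with h | h
        · subst h; simpa using hek
        · have := hrest z h
          simp only [decide_eq_true_eq]
          omega
      rw [hfk, hfne, List.foldl_nil]
      congr 1
      exact regroup r rest

lemma build_alt_char (l : List (Int × String × Int)) :
    build_alt l =
      (PySem.List.dedup ((PySem.List.sorted l (fun r => r.1) false).map (·.1))).map
        (fun k => (k, aggKey l k)) := by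
  have hagg : ∀ k : Int, aggKey l k =
      ((PySem.List.sorted l (fun r => r.1) false).filter
        (fun z => decide (z.1 = k))).foldl applyRec [0, 0, 0] := fun k => by
    rw [aggKey, ← filter_sorted l k]
  cases hs : PySem.List.sorted l (fun r => r.1) false with
  | nil => simp [build_alt, hs]
  | cons r rest =>
    have hp := PySem.List.sorted_pairwise l (fun r => r.1)
    rw [hs, List.pairwise_cons] at hp
    obtain ⟨hr, hp'⟩ := hp
    have hba : build_alt l = groupPass r.1 (setSlot [0, 0, 0] r.2.1 r.2.2) rest := by
      simp [build_alt, hs]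
    rw [hba, groupPass_eq rest r.1 _ hp' hr]
    rw [show (fun k => (k, aggKey l k)) =
        (fun k => (k, ((r :: rest).filter (fun z => decide (z.1 = k))).foldl applyRec [0, 0, 0]))
      from funext fun k => by rw [hagg k, hs]]
    exact regroup r rest

lemma sorted_ofList_eq_dedup (l : List (Int × String × Int)) :
    PySem.List.sorted (PySem.Set.ofList (l.map (·.1))) (fun k => k) false =
      PySem.List.dedup ((PySem.List.sorted l (fun r => r.1) false).map (·.1)) := by
  apply PySem.List.sorted_eq_of_perm_of_pairwise_lt
  · apply (List.perm_ext_iff_of_nodup (PySem.List.nodup_dedup _) (PySem.Set.nodup_ofList _)).mpr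
    intro a
    rw [PySem.List.mem_dedup, PySem.Set.mem_ofList]
    exact ((PySem.List.sorted_perm l (fun r => r.1) false).map (·.1)).mem_iff
  · have h1 : ((PySem.List.sorted l (fun r => r.1) false).map (·.1)).Pairwise (· ≤ ·) :=
      PySem.List.sorted_map_key_pairwise l (fun r => r.1)
    have h2 := List.Pairwise.sublist (dedup_sublist _) h1
    have h3 : (PySem.List.dedup ((PySem.List.sorted l (fun r => r.1) false).map (·.1))).Pairwise (· ≠ ·) :=
      PySem.List.nodup_dedup _
    exact (h2.and h3).imp fun h => lt_of_le_of_ne h.1 h.2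

-- ===== VERDICT (by name: the statement is the Claim_ definition above) =====
theorem build_spec : Claim_equal_build := by
  intro l _ _
  unfold Spec_build
  rw [build_char, build_alt_char, sorted_ofList_eq_dedup]
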